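-- pv_equiv track=rewrite | github.com/oliverjones-w/GeneralSearchAlgo | src/Old Style Status Report Formatter.py | parse_extracted_text
-- ===== SOURCE A (Python) =====
-- def parse_extracted_text(extracted_text):
--     data = {
--         "Position": [],
--         "Education": []
--     }
--     lines = extracted_text.split("\n")
--     section = None
--
--     for line in lines:
--         if "### Position" in line:
--             section = "Position"
--             continue
--         elif "### Education" in line:
--             section = "Education"
--             continue
--
--         if section == "Position" and "|" in line:
--             parts = line.split("|")
--             if len(parts) == 5:
--                 firm, title, start_year, end_year = parts[1], parts[2], parts[3], parts[4]
--                 data["Position"].append({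
--                     "Firm": firm.strip(),
--                     "Title": title.strip(),
--                     "Start Year": start_year.strip(),
--                     "End Year": end_year.strip()
--                 })
--
--         if section == "Education" and "|" in line:
--             parts = line.split("|")
--             if len(parts) == 4:
--                 degree, school, graduation_year = parts[1], parts[2], parts[3]
--                 data["Education"].append({
--                     "Degree": degree.strip(),
--                     "School": school.strip(),
--                     "Graduation Year": graduation_year.strip()
--                 })
--
--     return data
-- ===== SOURCE B (Python) =====
-- def parse_extracted_text(extracted_text):
--     lines = extracted_text.split("\n")
--     # pass 1: cut the text into (section_name, body_lines) segments;
--     # lines before the first header are dropped, header lines are not part of any body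
--     segments = []
--     for line in lines:
--         if "### Position" in line:
--             segments.append(("Position", []))
--         elif "### Education" in line:
--             segments.append(("Education", []))
--         elif segments:
--             segments[-1][1].append(line)
--     # pass 2: parse each segment's body into records
--     positions = []
--     education = []
--     for name, body in segments:
--         if name == "Position":
--             for line in body:
--                 if "|" in line:
--                     parts = line.split("|")
--                     if len(parts) == 5:
--                         positions.append({
--                             "Firm": parts[1].strip(),
--                             "Title": parts[2].strip(),
--                             "Start Year": parts[3].strip(),
--                             "End Year": parts[4].strip()
--                         })
--         else:
--             for line in body:
--                 if "|" in line:
--                     parts = line.split("|")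
--                     if len(parts) == 4:
--                         education.append({
--                             "Degree": parts[1].strip(),
--                             "School": parts[2].strip(),
--                             "Graduation Year": parts[3].strip()
--                         })
--     return {"Position": positions, "Education": education}
-- ===== Notes on version B (the rewrite author's own statement) =====
-- stated objective: alternative
-- what changed: B splits the work into two passes - first segment the lines into (section, body) chunks at the Position/Education markdown header lines, then parse each segment's body into records - instead of A's single scan that threads a mutable section flag and appends into the dict as it goes.
import Mathlib
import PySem

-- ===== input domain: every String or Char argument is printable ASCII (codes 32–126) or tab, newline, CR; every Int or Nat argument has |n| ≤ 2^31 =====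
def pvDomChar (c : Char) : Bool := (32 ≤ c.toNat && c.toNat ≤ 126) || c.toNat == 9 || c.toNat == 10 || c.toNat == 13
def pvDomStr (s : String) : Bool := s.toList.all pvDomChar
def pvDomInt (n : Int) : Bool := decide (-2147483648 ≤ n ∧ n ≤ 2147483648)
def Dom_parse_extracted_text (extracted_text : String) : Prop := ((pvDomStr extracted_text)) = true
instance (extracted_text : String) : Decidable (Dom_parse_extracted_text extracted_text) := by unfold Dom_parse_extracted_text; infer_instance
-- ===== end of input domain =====

-- B replaces A's single stateful scan by two passes (segment the lines under their headers,
-- then parse each segment's body); objective: alternative decomposition, same cost.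

-- line.split(sep) for the literal non-empty separators used here; exact (split? is none only for sep = "")
def pvSplit (s sep : String) : List String := (PySem.Str.split? s sep).getD []

-- ===== PORT A =====
def parse_extracted_text (extracted_text : String) : List (String × List (List (String × String))) :=
  let data : PySem.Dict String (List (List (String × String))) :=
    (PySem.Dict.empty.insert "Position" []).insert "Education" []
  let lines := pvSplit extracted_text "\n"
  (lines.foldl (fun (st : PySem.Dict String (List (List (String × String))) × Option String) line =>
    let data := st.1
    let sect := st.2
    if PySem.Str.isIn "### Position" line then (data, some "Position")
    else if PySem.Str.isIn "### Education" line then (data, some "Education")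
    else
      let data :=
        if sect == some "Position" && PySem.Str.isIn "|" line then
          let parts := pvSplit line "|"
          if parts.length == 5 then
            data.modify "Position" []
              (fun l => l ++ [[("Firm", PySem.Str.strip (PySem.List.pyGetD parts 1 "")),
                               ("Title", PySem.Str.strip (PySem.List.pyGetD parts 2 "")),
                               ("Start Year", PySem.Str.strip (PySem.List.pyGetD parts 3 "")),
                               ("End Year", PySem.Str.strip (PySem.List.pyGetD parts 4 ""))]])
          else data
        else data
      let data :=
        if sect == some "Education" && PySem.Str.isIn "|" line then
          let parts := pvSplit line "|"
          if parts.length == 4 then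
            data.modify "Education" []
              (fun l => l ++ [[("Degree", PySem.Str.strip (PySem.List.pyGetD parts 1 "")),
                               ("School", PySem.Str.strip (PySem.List.pyGetD parts 2 "")),
                               ("Graduation Year", PySem.Str.strip (PySem.List.pyGetD parts 3 ""))]])
          else data
        else data
      (data, sect)) (data, (none : Option String))).1.items

-- ===== PORT B =====
-- segments[-1][1].append(line): append line to the body of the last segment
def pvSegAdd (segs : List (String × List String)) (line : String) : List (String × List String) :=
  match segs with
  | [] => []
  | [(n, b)] => [(n, b ++ [line])]
  | s :: rest => s :: pvSegAdd rest line

-- body of B's pass-1 loop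
def pvSeg1 (segs : List (String × List String)) (line : String) : List (String × List String) :=
  if PySem.Str.isIn "### Position" line then segs ++ [("Position", [])]
  else if PySem.Str.isIn "### Education" line then segs ++ [("Education", [])]
  else if segs.isEmpty then segs
  else pvSegAdd segs line

-- body of B's inner Position loop
def pvPosStep (ps : List (List (String × String))) (line : String) : List (List (String × String)) :=
  if PySem.Str.isIn "|" line then
    let parts := pvSplit line "|"
    if parts.length == 5 then
      ps ++ [[("Firm", PySem.Str.strip (PySem.List.pyGetD parts 1 "")),
              ("Title", PySem.Str.strip (PySem.List.pyGetD parts 2 "")),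
              ("Start Year", PySem.Str.strip (PySem.List.pyGetD parts 3 "")),
              ("End Year", PySem.Str.strip (PySem.List.pyGetD parts 4 ""))]]
    else ps
  else ps

-- body of B's inner Education loop
def pvEduStep (es : List (List (String × String))) (line : String) : List (List (String × String)) :=
  if PySem.Str.isIn "|" line then
    let parts := pvSplit line "|"
    if parts.length == 4 then
      es ++ [[("Degree", PySem.Str.strip (PySem.List.pyGetD parts 1 "")),
              ("School", PySem.Str.strip (PySem.List.pyGetD parts 2 "")),
              ("Graduation Year", PySem.Str.strip (PySem.List.pyGetD parts 3 ""))]]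
    else es
  else es

-- body of B's pass-2 loop over segments
def pvPass2 (acc : List (List (String × String)) × List (List (String × String)))
    (seg : String × List String) :
    List (List (String × String)) × List (List (String × String)) :=
  if seg.1 == "Position" then (seg.2.foldl pvPosStep acc.1, acc.2)
  else (acc.1, seg.2.foldl pvEduStep acc.2)

def parse_extracted_text_alt (extracted_text : String) : List (String × List (List (String × String))) :=
  let lines := pvSplit extracted_text "\n"
  let segments := lines.foldl pvSeg1 []
  let acc := segments.foldl pvPass2 ([], [])
  [("Position", acc.1), ("Education", acc.2)]

-- ===== PRECONDITION & SPEC =====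
def Spec_parse_extracted_text (extracted_text : String) (out : List (String × List (List (String × String)))) : Prop := out = parse_extracted_text_alt extracted_text
instance (extracted_text : String) (out : List (String × List (List (String × String)))) : Decidable (Spec_parse_extracted_text extracted_text out) := by unfold Spec_parse_extracted_text; infer_instance

-- ===== CLAIM (what is proved, stated in full; the proofs are below) =====
def Claim_equal_parse_extracted_text : Prop := ∀ (extracted_text : String), Dom_parse_extracted_text extracted_text → Spec_parse_extracted_text extracted_text (parse_extracted_text extracted_text)

-- ===== LEMMAS AND PROOFS =====

-- A's loop body, named so the induction can speak about it (definitionally the lambda in the port)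
def aStep (st : PySem.Dict String (List (List (String × String))) × Option String)
    (line : String) : PySem.Dict String (List (List (String × String))) × Option String :=
  let data := st.1
  let sect := st.2
  if PySem.Str.isIn "### Position" line then (data, some "Position")
  else if PySem.Str.isIn "### Education" line then (data, some "Education")
  else
    let data :=
      if sect == some "Position" && PySem.Str.isIn "|" line then
        let parts := pvSplit line "|"
        if parts.length == 5 then
          data.modify "Position" []
            (fun l => l ++ [[("Firm", PySem.Str.strip (PySem.List.pyGetD parts 1 "")),
                             ("Title", PySem.Str.strip (PySem.List.pyGetD parts 2 "")),
                             ("Start Year", PySem.Str.strip (PySem.List.pyGetD parts 3 "")),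
                             ("End Year", PySem.Str.strip (PySem.List.pyGetD parts 4 ""))]])
        else data
      else data
    let data :=
      if sect == some "Education" && PySem.Str.isIn "|" line then
        let parts := pvSplit line "|"
        if parts.length == 4 then
          data.modify "Education" []
            (fun l => l ++ [[("Degree", PySem.Str.strip (PySem.List.pyGetD parts 1 "")),
                             ("School", PySem.Str.strip (PySem.List.pyGetD parts 2 "")),
                             ("Graduation Year", PySem.Str.strip (PySem.List.pyGetD parts 3 ""))]])
        else data
      else data
    (data, sect)

-- the two-key dict A maintains
def pvD (p e : List (List (String × String))) : PySem.Dict String (List (List (String × String))) :=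
  ⟨[("Position", p), ("Education", e)]⟩

-- the Position / Education records the remaining lines contribute, given the current section
def posR (sec : Option String) : List String → List (List (String × String))
  | [] => []
  | l :: ls =>
    if PySem.Str.isIn "### Position" l then posR (some "Position") ls
    else if PySem.Str.isIn "### Education" l then posR (some "Education") ls
    else (if sec == some "Position" then pvPosStep [] l else []) ++ posR sec ls

def eduR (sec : Option String) : List String → List (List (String × String))
  | [] => []
  | l :: ls =>
    if PySem.Str.isIn "### Position" l then eduR (some "Position") ls
    else if PySem.Str.isIn "### Education" l then eduR (some "Education") ls
    else (if sec == some "Education" then pvEduStep [] l else []) ++ eduR sec ls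

-- section A's scan ends in
def secR (sec : Option String) : List String → Option String
  | [] => sec
  | l :: ls =>
    if PySem.Str.isIn "### Position" l then secR (some "Position") ls
    else if PySem.Str.isIn "### Education" l then secR (some "Education") ls
    else secR sec ls

-- name of the currently open (= last) segment
def secOf (segs : List (String × List String)) : Option String := (segs.getLast?).map (·.1)

-- B's two pass-2 folds, one component at a time
def foldPos (segs : List (String × List String)) (a : List (List (String × String))) : List (List (String × String)) :=
  segs.foldl (fun a seg => if seg.1 == "Position" then seg.2.foldl pvPosStep a else a) a

def foldEdu (segs : List (String × List String)) (a : List (List (String × String))) : List (List (String × String)) :=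
  segs.foldl (fun a seg => if seg.1 == "Position" then a else seg.2.foldl pvEduStep a) a

theorem pvPosStep_append (a : List (List (String × String))) (l : String) :
    pvPosStep a l = a ++ pvPosStep [] l := by
  simp only [pvPosStep]; split_ifs <;> simp

theorem pvEduStep_append (a : List (List (String × String))) (l : String) :
    pvEduStep a l = a ++ pvEduStep [] l := by
  simp only [pvEduStep]; split_ifs <;> simp

theorem modifyP (p e : List (List (String × String))) (f : List (List (String × String)) → List (List (String × String))) :
    (pvD p e).modify "Position" [] f = pvD (f p) e := rfl

theorem modifyE (p e : List (List (String × String))) (f : List (List (String × String)) → List (List (String × String))) :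
    (pvD p e).modify "Education" [] f = pvD p (f e) := rfl

theorem secOf_segAdd : ∀ (segs : List (String × List String)) (l : String),
    secOf (pvSegAdd segs l) = secOf segs
  | [], _ => rfl
  | [(_, _)], _ => rfl
  | s :: t :: r, l => by
    have ih := secOf_segAdd (t :: r) l
    have h : pvSegAdd (s :: t :: r) l = s :: pvSegAdd (t :: r) l := rfl
    rw [h]
    cases hx : pvSegAdd (t :: r) l with
    | nil => rw [hx] at ih; simp [secOf] at ih
    | cons y ys =>
      rw [hx] at ih
      simpa [secOf, List.getLast?_cons_cons] using ih

theorem foldPos_cons (s : String × List String) (rest : List (String × List String))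
    (a : List (List (String × String))) :
    foldPos (s :: rest) a = foldPos rest (if s.1 == "Position" then s.2.foldl pvPosStep a else a) := rfl

theorem foldEdu_cons (s : String × List String) (rest : List (String × List String))
    (a : List (List (String × String))) :
    foldEdu (s :: rest) a = foldEdu rest (if s.1 == "Position" then a else s.2.foldl pvEduStep a) := rfl

theorem foldPos_nil (a : List (List (String × String))) : foldPos [] a = a := rfl

theorem foldEdu_nil (a : List (List (String × String))) : foldEdu [] a = a := rfl

theorem foldPos_segAdd : ∀ (segs : List (String × List String)) (l : String)
    (a : List (List (String × String))),
    foldPos (pvSegAdd segs l) a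
      = foldPos segs a ++ (if secOf segs == some "Position" then pvPosStep [] l else [])
  | [], l, a => by simp [pvSegAdd, foldPos, secOf]
  | [(n, b)], l, a => by
    have h : pvSegAdd [(n, b)] l = [(n, b ++ [l])] := rfl
    rw [h, foldPos_cons, foldPos_cons, foldPos_nil, foldPos_nil]
    by_cases hn : n == "Position"
    · simp only [hn, ite_true, List.foldl_append, List.foldl_cons, List.foldl_nil,
        secOf, List.getLast?_singleton, Option.map_some]
      rw [pvPosStep_append]
      simp [hn]
    · simp [secOf, hn]
  | s :: t :: r, l, a => by
    have ih := foldPos_segAdd (t :: r) l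
    have h : pvSegAdd (s :: t :: r) l = s :: pvSegAdd (t :: r) l := rfl
    rw [h, foldPos_cons, foldPos_cons, ih]
    have h2 : secOf (s :: t :: r) = secOf (t :: r) := by
      simp [secOf, List.getLast?_cons_cons]
    rw [h2]

theorem foldEdu_segAdd : ∀ (segs : List (String × List String)) (l : String)
    (a : List (List (String × String))),
    (secOf segs = none ∨ secOf segs = some "Position" ∨ secOf segs = some "Education") →
    foldEdu (pvSegAdd segs l) a
      = foldEdu segs a ++ (if secOf segs == some "Education" then pvEduStep [] l else [])
  | [], l, a, _ => by simp [pvSegAdd, foldEdu, secOf]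
  | [(n, b)], l, a, hOK => by
    have h : pvSegAdd [(n, b)] l = [(n, b ++ [l])] := rfl
    rw [h, foldEdu_cons, foldEdu_cons, foldEdu_nil, foldEdu_nil]
    have hn : n = "Position" ∨ n = "Education" := by
      rcases hOK with h' | h' | h' <;> simp [secOf] at h' <;> simp [h']
    rcases hn with hn | hn
    · subst hn; simp [secOf]
    · subst hn
      simp only [secOf, List.getLast?_singleton, Option.map_some]
      rw [show (("Education" : String) == "Position") = false from rfl]
      simp only [Bool.false_eq_true, ite_false, List.foldl_append, List.foldl_cons,
        List.foldl_nil]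
      rw [pvEduStep_append]
      simp
  | s :: t :: r, l, a, hOK => by
    have h2 : secOf (s :: t :: r) = secOf (t :: r) := by
      simp [secOf, List.getLast?_cons_cons]
    rw [h2] at hOK
    have ih := foldEdu_segAdd (t :: r) l
    have h : pvSegAdd (s :: t :: r) l = s :: pvSegAdd (t :: r) l := rfl
    rw [h, foldEdu_cons, foldEdu_cons, ih _ hOK, h2]

theorem foldPos_append_empty (segs : List (String × List String)) (n : String)
    (a : List (List (String × String))) :
    foldPos (segs ++ [(n, [])]) a = foldPos segs a := by
  simp [foldPos, List.foldl_append]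

theorem foldEdu_append_empty (segs : List (String × List String)) (n : String)
    (a : List (List (String × String))) :
    foldEdu (segs ++ [(n, [])]) a = foldEdu segs a := by
  simp [foldEdu, List.foldl_append]

theorem secOf_append (segs : List (String × List String)) (x : String × List String) :
    secOf (segs ++ [x]) = some x.1 := by
  simp [secOf]

-- pass 1 then pass 2 equals the direct recursion posR/eduR
theorem B1 (lines : List String) : ∀ (segs : List (String × List String))
    (a : List (List (String × String))),
    foldPos (lines.foldl pvSeg1 segs) a = foldPos segs a ++ posR (secOf segs) lines := by
  induction lines with
  | nil => intro segs a; simp [posR]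
  | cons l ls ih =>
    intro segs a
    rw [List.foldl_cons]
    by_cases h1 : PySem.Str.isIn "### Position" l
    · rw [show pvSeg1 segs l = segs ++ [("Position", [])] by
        simp only [pvSeg1]; rw [if_pos h1]]
      rw [ih, foldPos_append_empty, secOf_append]
      rw [show posR (secOf segs) (l :: ls) = posR (some "Position") ls by
        simp only [posR]; rw [if_pos h1]]
    · by_cases h2 : PySem.Str.isIn "### Education" l
      · rw [show pvSeg1 segs l = segs ++ [("Education", [])] by
          simp only [pvSeg1]; rw [if_neg h1, if_pos h2]]
        rw [ih, foldPos_append_empty, secOf_append]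
        rw [show posR (secOf segs) (l :: ls) = posR (some "Education") ls by
          simp only [posR]; rw [if_neg h1, if_pos h2]]
      · rw [show posR (secOf segs) (l :: ls)
            = (if secOf segs == some "Position" then pvPosStep [] l else [])
              ++ posR (secOf segs) ls by
          simp only [posR]; rw [if_neg h1, if_neg h2]]
        by_cases h3 : segs.isEmpty
        · have hs : segs = [] := List.isEmpty_iff.mp h3
          subst hs
          rw [show pvSeg1 [] l = [] by
            simp only [pvSeg1]; rw [if_neg h1, if_neg h2]; rfl]
          rw [ih]
          simp [secOf]
        · rw [show pvSeg1 segs l = pvSegAdd segs l by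
            simp only [pvSeg1]; rw [if_neg h1, if_neg h2, if_neg h3]]
          rw [ih, foldPos_segAdd, secOf_segAdd, List.append_assoc]

theorem B1e (lines : List String) : ∀ (segs : List (String × List String))
    (a : List (List (String × String))),
    (secOf segs = none ∨ secOf segs = some "Position" ∨ secOf segs = some "Education") →
    foldEdu (lines.foldl pvSeg1 segs) a = foldEdu segs a ++ eduR (secOf segs) lines := by
  induction lines with
  | nil => intro segs a _; simp [eduR]
  | cons l ls ih =>
    intro segs a hOK
    rw [List.foldl_cons]
    by_cases h1 : PySem.Str.isIn "### Position" l
    · rw [show pvSeg1 segs l = segs ++ [("Position", [])] by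
        simp only [pvSeg1]; rw [if_pos h1]]
      rw [ih _ _ (by rw [secOf_append]; right; left; rfl),
        foldEdu_append_empty, secOf_append]
      rw [show eduR (secOf segs) (l :: ls) = eduR (some "Position") ls by
        simp only [eduR]; rw [if_pos h1]]
    · by_cases h2 : PySem.Str.isIn "### Education" l
      · rw [show pvSeg1 segs l = segs ++ [("Education", [])] by
          simp only [pvSeg1]; rw [if_neg h1, if_pos h2]]
        rw [ih _ _ (by rw [secOf_append]; right; right; rfl),
          foldEdu_append_empty, secOf_append]
        rw [show eduR (secOf segs) (l :: ls) = eduR (some "Education") ls by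
          simp only [eduR]; rw [if_neg h1, if_pos h2]]
      · rw [show eduR (secOf segs) (l :: ls)
            = (if secOf segs == some "Education" then pvEduStep [] l else [])
              ++ eduR (secOf segs) ls by
          simp only [eduR]; rw [if_neg h1, if_neg h2]]
        by_cases h3 : segs.isEmpty
        · have hs : segs = [] := List.isEmpty_iff.mp h3
          subst hs
          rw [show pvSeg1 [] l = [] by
            simp only [pvSeg1]; rw [if_neg h1, if_neg h2]; rfl]
          rw [ih _ _ (Or.inl rfl)]
          simp [secOf]
        · rw [show pvSeg1 segs l = pvSegAdd segs l by
            simp only [pvSeg1]; rw [if_neg h1, if_neg h2, if_neg h3]]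
          rw [ih _ _ (by rw [secOf_segAdd]; exact hOK),
            foldEdu_segAdd _ _ _ hOK, secOf_segAdd, List.append_assoc]

theorem pairSplit : ∀ (segs : List (String × List String))
    (a b : List (List (String × String))),
    segs.foldl pvPass2 (a, b) = (foldPos segs a, foldEdu segs b)
  | [], a, b => rfl
  | s :: rest, a, b => by
    rw [List.foldl_cons, foldPos_cons, foldEdu_cons]
    by_cases h : s.1 == "Position" <;>
      simp only [pvPass2, h, Bool.false_eq_true, ite_true, ite_false] <;>
      exact pairSplit rest _ _

-- A's scan from the two-key dict equals the direct recursion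
theorem A1 (lines : List String) : ∀ (p e : List (List (String × String))) (sec : Option String),
    lines.foldl aStep (pvD p e, sec)
      = (pvD (p ++ posR sec lines) (e ++ eduR sec lines), secR sec lines) := by
  induction lines with
  | nil => intro p e sec; simp [posR, eduR, secR]
  | cons l ls ih =>
    intro p e sec
    rw [List.foldl_cons]
    by_cases h1 : PySem.Str.isIn "### Position" l
    · rw [show aStep (pvD p e, sec) l = (pvD p e, some "Position") by
        simp only [aStep]; rw [if_pos h1]]
      rw [ih,
        show posR sec (l :: ls) = posR (some "Position") ls by
          simp only [posR]; rw [if_pos h1],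
        show eduR sec (l :: ls) = eduR (some "Position") ls by
          simp only [eduR]; rw [if_pos h1],
        show secR sec (l :: ls) = secR (some "Position") ls by
          simp only [secR]; rw [if_pos h1]]
    · by_cases h2 : PySem.Str.isIn "### Education" l
      · rw [show aStep (pvD p e, sec) l = (pvD p e, some "Education") by
          simp only [aStep]; rw [if_neg h1, if_pos h2]]
        rw [ih,
          show posR sec (l :: ls) = posR (some "Education") ls by
            simp only [posR]; rw [if_neg h1, if_pos h2],
          show eduR sec (l :: ls) = eduR (some "Education") ls by
            simp only [eduR]; rw [if_neg h1, if_pos h2],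
          show secR sec (l :: ls) = secR (some "Education") ls by
            simp only [secR]; rw [if_neg h1, if_pos h2]]
      · have hstep : aStep (pvD p e, sec) l
            = (pvD (p ++ (if sec == some "Position" then pvPosStep [] l else []))
                   (e ++ (if sec == some "Education" then pvEduStep [] l else [])), sec) := by
          simp only [aStep]
          rw [if_neg h1, if_neg h2]
          by_cases h3 : sec == some "Position"
          · have h4 : (sec == some "Education") = false := by
              have := (beq_iff_eq).mp h3; subst this; rfl
            simp only [h3, h4, Bool.true_and, Bool.false_and, Bool.false_eq_true,
              ite_false, ite_true, pvPosStep]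
            by_cases h5 : PySem.Str.isIn "|" l
            · simp only [h5, ite_true]
              by_cases h6 : (pvSplit l "|").length == 5
              · simp only [h6, ite_true, modifyP]
                simp only [h3, ite_true, h4, Bool.false_eq_true, ite_false,
                  List.append_nil, List.nil_append, pvPosStep, h5]
              · simp only [h6, Bool.false_eq_true, ite_false]; simp
            · simp only [h5, Bool.false_eq_true, ite_false]; simp
          · by_cases h4 : sec == some "Education"
            · simp only [h3, h4, Bool.true_and, Bool.false_and, Bool.false_eq_true,
                ite_false, ite_true, pvEduStep]
              by_cases h5 : PySem.Str.isIn "|" l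
              · simp only [h5, ite_true]
                by_cases h6 : (pvSplit l "|").length == 4
                · simp only [h6, ite_true, modifyE]
                  simp only [h3, h4, ite_true, Bool.false_eq_true, ite_false,
                    List.append_nil, List.nil_append, pvEduStep, h5]
                · simp only [h6, Bool.false_eq_true, ite_false]; simp
              · simp only [h5, Bool.false_eq_true, ite_false]; simp
            · simp only [h3, h4, Bool.false_and, Bool.false_eq_true, ite_false]; simp
        rw [hstep, ih,
          show posR sec (l :: ls)
              = (if sec == some "Position" then pvPosStep [] l else []) ++ posR sec ls by
            simp only [posR]; rw [if_neg h1, if_neg h2],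
          show eduR sec (l :: ls)
              = (if sec == some "Education" then pvEduStep [] l else []) ++ eduR sec ls by
            simp only [eduR]; rw [if_neg h1, if_neg h2],
          show secR sec (l :: ls) = secR sec ls by
            simp only [secR]; rw [if_neg h1, if_neg h2]]
        simp [List.append_assoc]

-- ===== VERDICT (by name: the statement is the Claim_ definition above) =====
theorem parse_extracted_text_spec : Claim_equal_parse_extracted_text := by
  intro t _
  show parse_extracted_text t = parse_extracted_text_alt t
  have hA : parse_extracted_text t
      = (((pvSplit t "\n").foldl aStep (pvD [] [], none)).1).items := rfl
  have hB : parse_extracted_text_alt t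
      = [("Position", ((pvSplit t "\n").foldl pvSeg1 []).foldl pvPass2 ([], []) |>.1),
         ("Education", ((pvSplit t "\n").foldl pvSeg1 []).foldl pvPass2 ([], []) |>.2)] := rfl
  rw [hA, hB, A1, pairSplit, B1, B1e _ _ _ (Or.inl rfl)]
  simp [pvD, secOf, foldPos, foldEdu, PySem.Dict.items]
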